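-- pv_equiv track=rewrite | github.com/Xuswnss/CodingTest | DailyAlgo/05_삼각형_최소_둘레_구하기/Solution.py | solution
-- ===== SOURCE A (Python) =====
-- def solution(sides):
--     answer = float('inf')
--     min_preimeter = float('inf')
--     sides.sort()
--     n = len(sides)
--
--     for i in range(n):
--         for j in range(i+1, n):
--             for k in range(j+1, n):
--                 first, second, third = sides[i], sides[j], sides[k]
--
--                 if first + second > third and second + third > first and third + first > second:
--                     temp = first + second + third
--                     if temp < min_preimeter:
--                         min_preimeter = temp
--                         answer = temp
--
--     return answer if answer != float('inf') else None
-- ===== SOURCE B (Python) =====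
-- def solution(sides):
--     # Sort once; the two larger sides of a minimum-perimeter triangle can be
--     # taken adjacent in sorted order, and the smallest valid third side is the
--     # first element of the prefix that satisfies the triangle inequality.
--     t = sorted(sides)
--     best = None
--     for j in range(1, len(t) - 1):
--         b, c = t[j], t[j + 1]
--         for a in t[:j]:
--             if a + b > c:
--                 p = a + b + c
--                 if best is None or p < best:
--                     best = p
--                 break
--     return best
-- ===== Notes on version B (the rewrite author's own statement) =====
-- stated objective: faster
-- what changed: A enumerates all O(n^3) index triples and tracks the minimum valid perimeter; B sorts once and, for each adjacent pair of larger sides (t[j], t[j+1]), takes the first (smallest) prefix element satisfying the triangle inequality, using the facts that the two larger sides of a minimum-perimeter triangle can be chosen adjacent in sorted order and the third side minimal.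
import Mathlib
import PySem

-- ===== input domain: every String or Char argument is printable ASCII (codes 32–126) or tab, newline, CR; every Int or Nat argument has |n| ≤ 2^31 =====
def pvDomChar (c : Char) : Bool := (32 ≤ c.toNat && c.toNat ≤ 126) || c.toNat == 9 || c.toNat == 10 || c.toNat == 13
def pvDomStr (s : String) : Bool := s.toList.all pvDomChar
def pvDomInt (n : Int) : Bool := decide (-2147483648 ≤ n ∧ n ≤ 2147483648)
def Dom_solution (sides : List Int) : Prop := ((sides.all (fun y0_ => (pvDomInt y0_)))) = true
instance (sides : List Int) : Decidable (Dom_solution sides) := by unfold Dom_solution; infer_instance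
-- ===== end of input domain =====

-- B replaces A's O(n^3) scan of all index triples by a sorted sweep over adjacent
-- larger-side pairs with a first-hit prefix scan (objective: faster).
-- Note: A sorts its argument in place; the equivalence proved here is about the
-- RETURN value only (B does not mutate its argument).

-- ===== PORT A =====
def solution (sides : List Int) : Option Int :=
  let t := PySem.List.sorted sides (fun x => x) false   -- sides.sort()
  let n : Int := t.length
  -- answer / min_preimeter: float('inf') sentinel modelled as `none`
  -- (temp < inf is always true, and `answer != inf` iff it was ever set)
  let st :=
    (PySem.List.pyRange 0 n 1).foldl (fun st i =>
      (PySem.List.pyRange (i+1) n 1).foldl (fun st j =>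
        (PySem.List.pyRange (j+1) n 1).foldl (fun st k =>
          let first := PySem.List.pyGetD t i 0
          let second := PySem.List.pyGetD t j 0
          let third := PySem.List.pyGetD t k 0
          if first + second > third ∧ second + third > first ∧ third + first > second then
            let temp := first + second + third
            if (match st.2 with | none => true | some m => decide (temp < m)) = true then
              (some temp, some temp)
            else st
          else st) st) st) ((none : Option Int), (none : Option Int))
  st.1

-- ===== PORT B =====
def solution_alt (sides : List Int) : Option Int :=
  let t := PySem.List.sorted sides (fun x => x) false   -- t = sorted(sides)
  (PySem.List.pyRange 1 ((t.length : Int) - 1) 1).foldl (fun best j =>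
    let b := PySem.List.pyGetD t j 0
    let c := PySem.List.pyGetD t (j + 1) 0
    -- a = next((x for x in t[:j] if x + b > c), None)
    match (PySem.List.slice t none (some j)).find? (fun x => decide (x + b > c)) with
    | some a =>
        let p := a + b + c
        match best with
        | none => some p
        | some m => if p < m then some p else best
    | none => best) none

-- ===== PRECONDITION & SPEC =====
def Spec_solution (sides : List Int) (out : Option Int) : Prop := out = solution_alt sides
instance (sides : List Int) (out : Option Int) : Decidable (Spec_solution sides out) := by unfold Spec_solution; infer_instance

-- ===== CLAIM (what is proved, stated in full; the proofs are below) =====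
def Claim_equal_solution : Prop := ∀ (sides : List Int), Dom_solution sides → Spec_solution sides (solution sides)

-- ===== LEMMAS AND PROOFS =====

-- running minimum step (`none` = not set yet), shared shape of both loops
def mupd (best : Option Int) (p : Int) : Option Int :=
  match best with | none => some p | some m => if p < m then some p else some m

def triValid (t : List Int) (e : Int × Int × Int) : Bool :=
  decide (PySem.List.pyGetD t e.1 0 + PySem.List.pyGetD t e.2.1 0 > PySem.List.pyGetD t e.2.2 0 ∧
          PySem.List.pyGetD t e.2.1 0 + PySem.List.pyGetD t e.2.2 0 > PySem.List.pyGetD t e.1 0 ∧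
          PySem.List.pyGetD t e.2.2 0 + PySem.List.pyGetD t e.1 0 > PySem.List.pyGetD t e.2.1 0)

def triPerim (t : List Int) (e : Int × Int × Int) : Int :=
  PySem.List.pyGetD t e.1 0 + PySem.List.pyGetD t e.2.1 0 + PySem.List.pyGetD t e.2.2 0

def triples (n : Int) : List (Int × Int × Int) :=
  (PySem.List.pyRange 0 n 1).flatMap (fun i =>
    (PySem.List.pyRange (i+1) n 1).flatMap (fun j =>
      (PySem.List.pyRange (j+1) n 1).map (fun k => (i, j, k))))

def candsA (t : List Int) : List Int :=
  ((triples (t.length : Int)).filter (triValid t)).map (triPerim t)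

def candB (t : List Int) (j : Int) : Option Int :=
  ((t.take j.toNat).find? (fun x => decide (x + PySem.List.pyGetD t j 0 > PySem.List.pyGetD t (j+1) 0))).map
    (fun a => a + PySem.List.pyGetD t j 0 + PySem.List.pyGetD t (j+1) 0)

def candsB (t : List Int) : List Int :=
  (PySem.List.pyRange 1 ((t.length : Int) - 1) 1).flatMap (fun j => (candB t j).toList)

lemma foldl_mupd_some (L : List Int) (m : Int) :
    L.foldl mupd (some m) = some (L.foldl min m) := by
  induction L generalizing m with
  | nil => rfl
  | cons x L ih =>
      simp only [List.foldl_cons, mupd]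
      rcases lt_or_ge x m with h | h
      · rw [if_pos h, ih, min_eq_right h.le]
      · rw [if_neg (not_lt.mpr h), ih, min_eq_left h]

lemma foldl_mupd_none (L : List Int) : L.foldl mupd none = L.min? := by
  cases L with
  | nil => rfl
  | cons x L => simp [List.foldl_cons, mupd, foldl_mupd_some, List.min?]

lemma min?_eq_of (L M : List Int) (h1 : ∀ x ∈ M, x ∈ L)
    (h2 : ∀ x ∈ L, ∃ y ∈ M, y ≤ x) : L.min? = M.min? := by
  cases hL : L.min? with
  | none =>
      rw [List.min?_eq_none_iff] at hL
      subst hL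
      have : M = [] := by
        cases M with
        | nil => rfl
        | cons m M => exact absurd (h1 m (by simp)) (by simp)
      simp [this]
  | some a =>
      rw [List.min?_eq_some_iff] at hL
      obtain ⟨haL, hlb⟩ := hL
      obtain ⟨y, hyM, hya⟩ := h2 a haL
      have hay : a ≤ y := hlb y (h1 y hyM)
      have : y = a := le_antisymm hya hay
      subst this
      exact (List.min?_eq_some_iff.mpr ⟨hyM, fun b hb => hlb b (h1 b hb)⟩).symm

-- a fold whose step maps the diagonal to the diagonal stays on the diagonal
lemma foldl_diag {β : Type} (f : Option Int × Option Int → β → Option Int × Option Int)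
    (g : Option Int → β → Option Int)
    (h : ∀ x b, f (x, x) b = (g x b, g x b)) (L : List β) (x : Option Int) :
    L.foldl f (x, x) = (L.foldl g x, L.foldl g x) := by
  induction L generalizing x with
  | nil => rfl
  | cons b L ih => simp only [List.foldl_cons, h]; exact ih _

lemma solution_eq_min? (sides : List Int) :
    solution sides = (candsA (PySem.List.sorted sides (fun x => x) false)).min? := by
  simp only [solution]
  generalize PySem.List.sorted sides (fun x => x) false = t
  have hstep : ∀ (x : Option Int) (e : Int × Int × Int),
      (if triValid t e = true then mupd x (triPerim t e) else x) =
      (if PySem.List.pyGetD t e.1 0 + PySem.List.pyGetD t e.2.1 0 > PySem.List.pyGetD t e.2.2 0 ∧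
          PySem.List.pyGetD t e.2.1 0 + PySem.List.pyGetD t e.2.2 0 > PySem.List.pyGetD t e.1 0 ∧
          PySem.List.pyGetD t e.2.2 0 + PySem.List.pyGetD t e.1 0 > PySem.List.pyGetD t e.2.1 0 then
        mupd x (triPerim t e) else x) := by
    intro x e
    simp [triValid]
  rw [foldl_diag _
        (fun x i => (PySem.List.pyRange (i+1) ((t.length : Int)) 1).foldl (fun x j =>
          (PySem.List.pyRange (j+1) ((t.length : Int)) 1).foldl (fun x k =>
            if triValid t (i, j, k) = true then mupd x (triPerim t (i, j, k)) else x) x) x)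
        ?_]
  · -- now single-state nested folds = candsA min?
    rw [show ((candsA t).min?) = (candsA t).foldl mupd none from (foldl_mupd_none _).symm]
    simp only [candsA, List.foldl_map, List.foldl_filter, triples, List.foldl_flatMap]
  · intro x b
    apply foldl_diag
    intro x j
    apply foldl_diag
    intro x k
    simp only [triValid, triPerim, mupd, decide_eq_true_eq]
    by_cases hv : (PySem.List.pyGetD t b 0 + PySem.List.pyGetD t j 0 > PySem.List.pyGetD t k 0 ∧
        PySem.List.pyGetD t j 0 + PySem.List.pyGetD t k 0 > PySem.List.pyGetD t b 0 ∧
        PySem.List.pyGetD t k 0 + PySem.List.pyGetD t b 0 > PySem.List.pyGetD t j 0)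
    · simp only [if_pos hv]
      cases x with
      | none => simp
      | some m =>
          by_cases hlt : PySem.List.pyGetD t b 0 + PySem.List.pyGetD t j 0 + PySem.List.pyGetD t k 0 < m <;>
            simp [hlt]
    · simp [if_neg hv]


lemma solution_alt_eq_min? (sides : List Int) :
    solution_alt sides = (candsB (PySem.List.sorted sides (fun x => x) false)).min? := by
  simp only [solution_alt]
  generalize PySem.List.sorted sides (fun x => x) false = t
  rw [← foldl_mupd_none, candsB, List.foldl_flatMap]
  apply PySem.List.foldl_congr_mem
  intro best j hj
  have hj1 : (1:Int) ≤ j := ((PySem.List.mem_pyRange_one).mp hj).1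
  rw [PySem.List.slice_to t (by omega : (0:Int) ≤ j)]
  simp only [candB]
  cases hf : (t.take j.toNat).find?
      (fun x => decide (x + PySem.List.pyGetD t j 0 > PySem.List.pyGetD t (j+1) 0)) with
  | none => simp
  | some a =>
      cases best with
      | none => simp [mupd]
      | some m => simp [mupd]


lemma mem_candsA (t : List Int) (x : Int) :
    x ∈ candsA t ↔ ∃ i j k : Int, 0 ≤ i ∧ i < j ∧ j < k ∧ k < (t.length : Int) ∧
      triValid t (i, j, k) = true ∧ x = triPerim t (i, j, k) := by
  simp only [candsA, triples, List.mem_map, List.mem_filter, List.mem_flatMap,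
    PySem.List.mem_pyRange_one]
  constructor
  · rintro ⟨e, ⟨⟨i, ⟨hi0, hin⟩, j, ⟨hj1, hjn⟩, k, ⟨hk1, hkn⟩, rfl⟩, hv⟩, rfl⟩
    exact ⟨i, j, k, hi0, by omega, by omega, hkn, hv, rfl⟩
  · rintro ⟨i, j, k, hi0, hij, hjk, hkn, hv, rfl⟩
    exact ⟨(i, j, k), ⟨⟨i, ⟨hi0, by omega⟩, j, ⟨by omega, by omega⟩, k, ⟨by omega, hkn⟩, rfl⟩, hv⟩, rfl⟩


lemma mem_candsB (t : List Int) (x : Int) :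
    x ∈ candsB t ↔ ∃ j : Int, 1 ≤ j ∧ j < (t.length : Int) - 1 ∧ ∃ a : Int,
      (t.take j.toNat).find? (fun v => decide (v + PySem.List.pyGetD t j 0 > PySem.List.pyGetD t (j+1) 0)) = some a ∧
      x = a + PySem.List.pyGetD t j 0 + PySem.List.pyGetD t (j+1) 0 := by
  simp only [candsB, candB, List.mem_flatMap, PySem.List.mem_pyRange_one, Option.mem_toList,
    Option.map_eq_some_iff]
  constructor
  · rintro ⟨j, ⟨hj1, hjn⟩, a, hf, rfl⟩
    exact ⟨j, hj1, hjn, a, hf, rfl⟩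
  · rintro ⟨j, hj1, hjn, a, hf, rfl⟩
    exact ⟨j, ⟨hj1, hjn⟩, a, hf, rfl⟩


lemma cands_min?_eq (t : List Int) (hp : t.Pairwise (· ≤ ·)) :
    (candsA t).min? = (candsB t).min? := by
  have hget : ∀ i : Int, 0 ≤ i → PySem.List.pyGetD t i 0 = t.getD i.toNat 0 := by
    intro i h0
    rw [← Int.toNat_of_nonneg h0, PySem.List.pyGetD_natCast, Int.toNat_of_nonneg h0]
  have hmono : ∀ p q : Nat, p ≤ q → q < t.length → t.getD p 0 ≤ t.getD q 0 := by
    intro p q hpq hq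
    rcases eq_or_lt_of_le hpq with rfl | hlt
    · exact le_refl _
    · rw [List.getD_eq_getElem t 0 (by omega), List.getD_eq_getElem t 0 hq]
      exact List.pairwise_iff_getElem.mp hp p q (by omega) hq hlt
  apply min?_eq_of
  · -- candsB ⊆ candsA
    intro x hx
    rw [mem_candsB] at hx
    obtain ⟨j, hj1, hjn, a, hf, rfl⟩ := hx
    have hmem := List.mem_of_find?_eq_some hf
    have hpred := List.find?_some hf
    simp only [decide_eq_true_eq] at hpred
    obtain ⟨i, hi, ha⟩ := List.mem_iff_getElem.mp hmem
    have hilen : i < t.length := by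
      have h1 : (t.take j.toNat).length = min j.toNat t.length := List.length_take
      omega
    have hij : (i : Int) < j := by
      have h1 : (t.take j.toNat).length = min j.toNat t.length := List.length_take
      omega
    have hai : a = t.getD i 0 := by
      rw [List.getD_eq_getElem t 0 hilen, ← ha, List.getElem_take]
    have hjlen : j < (t.length : Int) := by omega
    rw [mem_candsA]
    refine ⟨i, j, j + 1, by omega, by omega, by omega, by omega, ?_, ?_⟩
    · simp only [triValid, decide_eq_true_eq]
      rw [hget i (by omega), hget j (by omega), hget (j+1) (by omega)]
      rw [hget j (by omega), hget (j+1) (by omega)] at hpred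
      have h1 : t.getD i 0 ≤ t.getD j.toNat 0 := by
        have : (i : Int).toNat = i := by omega
        rw [← this]; exact hmono _ _ (by omega) (by omega)
      have h2 : t.getD j.toNat 0 ≤ t.getD (j+1).toNat 0 := hmono _ _ (by omega) (by omega)
      have hit : ((i : Int)).toNat = i := by omega
      rw [hit]
      omega
    · simp only [triPerim]
      rw [hget i (by omega), hget j (by omega), hget (j+1) (by omega)]
      have hit : ((i : Int)).toNat = i := by omega
      rw [hit, ← hai]
  · -- domination
    intro x hx
    rw [mem_candsA] at hx
    obtain ⟨i, j, k, hi0, hij, hjk, hkn, hv, rfl⟩ := hx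
    simp only [triValid, decide_eq_true_eq] at hv
    rw [hget i (by omega), hget j (by omega), hget k (by omega)] at hv
    have hitake : i.toNat < (t.take j.toNat).length := by
      rw [List.length_take]; omega
    have hti_mem : t.getD i.toNat 0 ∈ t.take j.toNat := by
      have : (t.take j.toNat)[i.toNat]'hitake = t.getD i.toNat 0 := by
        rw [List.getElem_take, ← List.getD_eq_getElem t 0 (by omega)]
      rw [← this]; exact List.getElem_mem _
    have hpredti : t.getD i.toNat 0 + PySem.List.pyGetD t j 0 > PySem.List.pyGetD t (j+1) 0 := by
      rw [hget j (by omega), hget (j+1) (by omega)]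
      have : t.getD (j+1).toNat 0 ≤ t.getD k.toNat 0 := hmono _ _ (by omega) (by omega)
      omega
    have hsome : ∃ a, (t.take j.toNat).find?
        (fun v => decide (v + PySem.List.pyGetD t j 0 > PySem.List.pyGetD t (j+1) 0)) = some a := by
      have hIs : ((t.take j.toNat).find?
          (fun v => decide (v + PySem.List.pyGetD t j 0 > PySem.List.pyGetD t (j+1) 0))).isSome :=
        List.find?_isSome.mpr ⟨_, hti_mem, decide_eq_true hpredti⟩
      exact Option.isSome_iff_exists.mp hIs
    obtain ⟨a, hf⟩ := hsome
    refine ⟨a + PySem.List.pyGetD t j 0 + PySem.List.pyGetD t (j+1) 0, ?_, ?_⟩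
    · rw [mem_candsB]
      exact ⟨j, by omega, by omega, a, hf, rfl⟩
    · -- a ≤ t_i, t_{j+1} ≤ t_k
      have hale : a ≤ t.getD i.toNat 0 := by
        obtain ⟨hpa, as, bs, heq, hnot⟩ := List.find?_eq_some_iff_append.mp hf
        have hpw : (t.take j.toNat).Pairwise (· ≤ ·) := hp.sublist (List.take_sublist _ _)
        rw [heq] at hpw hti_mem
        have hti_ab : t.getD i.toNat 0 ∈ a :: bs := by
          rcases List.mem_append.mp hti_mem with h | h
          · have := hnot _ h
            simp only [Bool.not_eq_eq_eq_not, Bool.not_true, decide_eq_false_iff_not] at this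
            omega
          · exact h
        obtain ⟨-, hpw2, -⟩ := List.pairwise_append.mp hpw
        rcases List.mem_cons.mp hti_ab with h | h
        · omega
        · exact (List.pairwise_cons.mp hpw2).1 _ h
      simp only [triPerim]
      rw [hget i (by omega), hget j (by omega), hget k (by omega), hget (j+1) (by omega)]
      have : t.getD (j+1).toNat 0 ≤ t.getD k.toNat 0 := hmono _ _ (by omega) (by omega)
      omega


-- ===== VERDICT (by name: the statement is the Claim_ definition above) =====
theorem solution_spec : Claim_equal_solution := by
  intro sides _
  unfold Spec_solution
  rw [solution_eq_min?, solution_alt_eq_min?]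
  exact cands_min?_eq _ (PySem.List.sorted_pairwise sides (fun x => x))
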